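-- pv_equiv track=rewrite | github.com/alaminjwel/code-base | coderbyte/String/Medium/String Reduce.py | StringReduction
-- ===== SOURCE A (Python) =====
-- def StringReduction(strParam):
--    # Base case: if the string length is 1 or 2, no further reduction is possible
--     if len(strParam) == 1 or (len(strParam) == 2 and strParam[0]==strParam[1]):
--         return len(strParam)
--
--     # Check for adjacent characters that can be reduced
--     for i in range(len(strParam) - 1):
--         if strParam[i] != strParam[i+1]:
--             reduced_str = strParam[:i] + get_replacement(strParam[i], strParam[i+1]) + strParam[i+2:]
--             return StringReduction(reduced_str)  # Recursive call
--
--     # If no reduction was possible, return the length of the string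
--     return len(strParam)
--
-- def get_replacement(a, b):
--     # Determine the replacement character based on the given characters
--     if (a == 'a' and b == 'b') or (a == 'b' and b == 'a'):
--         return 'c'
--     elif (a == 'a' and b == 'c') or (a == 'c' and b == 'a'):
--         return 'b'
--     elif (a == 'b' and b == 'c') or (a == 'c' and b == 'b'):
--         return 'a'
-- ===== SOURCE B (Python) =====
-- _THIRD = {('a', 'b'): 'c', ('b', 'a'): 'c',
--           ('a', 'c'): 'b', ('c', 'a'): 'b',
--           ('b', 'c'): 'a', ('c', 'b'): 'a'}
--
-- def StringReduction(strParam):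
--     # Single left-to-right pass with a stack: an incoming character merges
--     # with the top of the stack (into the third letter) as long as they form
--     # a reducible pair; this computes the same final string as repeatedly
--     # reducing the leftmost differing adjacent pair.
--     stack = []
--     for ch in strParam:
--         while stack and (stack[-1], ch) in _THIRD:
--             ch = _THIRD[(stack.pop(), ch)]
--         stack.append(ch)
--     return len(stack)
-- ===== Notes on version B (the rewrite author's own statement) =====
-- stated objective: alternative
-- what changed: Replaced A's restart-from-scratch recursion (rebuild the string and rescan from index 0 after every single reduction) by a single left-to-right pass with a stack that cascades merges with the stack top.
import Mathlib
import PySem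

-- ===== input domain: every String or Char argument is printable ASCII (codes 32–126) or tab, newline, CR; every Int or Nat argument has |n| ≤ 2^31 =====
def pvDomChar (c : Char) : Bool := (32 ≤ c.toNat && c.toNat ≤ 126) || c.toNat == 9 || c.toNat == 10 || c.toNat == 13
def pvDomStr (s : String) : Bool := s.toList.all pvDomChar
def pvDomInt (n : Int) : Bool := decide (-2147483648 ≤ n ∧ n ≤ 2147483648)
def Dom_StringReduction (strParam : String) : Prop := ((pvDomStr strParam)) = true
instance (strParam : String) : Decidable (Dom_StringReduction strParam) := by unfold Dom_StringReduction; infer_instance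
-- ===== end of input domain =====

-- B replaces A's restart-from-scratch reduction recursion by a single left-to-right stack pass.

-- ===== PORT A =====
def getReplacement (a b : Char) : Option Char :=
  if (a = 'a' ∧ b = 'b') ∨ (a = 'b' ∧ b = 'a') then some 'c'
  else if (a = 'a' ∧ b = 'c') ∨ (a = 'c' ∧ b = 'a') then some 'b'
  else if (a = 'b' ∧ b = 'c') ∨ (a = 'c' ∧ b = 'b') then some 'a'
  else none

-- the scan 'for i in range(len-1): if s[i] != s[i+1]: …' as a structural recursion,
-- returning the prefix before the first differing adjacent pair, the pair, and the suffix
def findPair : List Char → Option (List Char × Char × Char × List Char)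
  | a :: b :: rest =>
      if a ≠ b then some ([], a, b, rest)
      else match findPair (b :: rest) with
        | some (p, x, y, s) => some (a :: p, x, y, s)
        | none => none
  | _ => none

-- needed by srList's termination proof, hence above it
theorem findPair_shape : ∀ {s p : List Char} {a b : Char} {suf : List Char},
    findPair s = some (p, a, b, suf) → s = p ++ a :: b :: suf ∧ (∀ x ∈ p, x = a) ∧ a ≠ b := by
  intro s
  induction s with
  | nil => intro p a b suf h; simp [findPair] at h
  | cons x t ih =>
    intro p a b suf h
    match t with
    | [] => simp [findPair] at h
    | y :: rest =>
      rw [findPair] at h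
      by_cases hxy : x = y
      · rw [if_neg (by simp [hxy])] at h
        rcases h' : findPair (y :: rest) with _ | ⟨p', a', b', suf'⟩
        · rw [h'] at h; exact absurd h (by simp)
        · rw [h'] at h
          simp only [Option.some.injEq, Prod.mk.injEq] at h
          obtain ⟨hp, ha, hb, hs⟩ := h
          obtain ⟨hsh, hall, hne'⟩ := ih h'
          rw [← hp, ← ha, ← hb, ← hs]
          refine ⟨by simp [hsh], ?_, hne'⟩
          intro z hz
          rcases List.mem_cons.mp hz with hz | hz
          · subst hz
            cases p' with
            | nil =>
              have hy : y = a' := by simpa using congrArg List.head? hsh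
              rw [hxy, hy]
            | cons q qt =>
              have hq : y = q := by simpa using congrArg List.head? hsh
              rw [hxy, hq]; exact hall q (by simp)
          · exact hall z hz
      · rw [if_pos (by simp [hxy])] at h
        simp only [Option.some.injEq, Prod.mk.injEq] at h
        obtain ⟨hp, ha, hb, hs⟩ := h
        rw [← hp, ← ha, ← hb, ← hs]
        exact ⟨by simp, by simp, hxy⟩

def srList (s : List Char) : Int :=
  if s.length = 1 ∨ (s.length = 2 ∧ s[0]? = s[1]?) then (s.length : Int)
  else match h : findPair s with
    | some (p, a, b, suf) =>
        match getReplacement a b with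
        | some c => srList (p ++ c :: suf)
        | none => 0          -- here Python raises TypeError; excluded by Pre_
    | none => (s.length : Int)
termination_by s.length
decreasing_by
  have := (findPair_shape h).1
  subst this
  simp

def StringReduction (strParam : String) : Int := srList strParam.toList

-- ===== PORT B =====
-- the dict _THIRD as a lookup function
def thirdChar : Char → Char → Option Char
  | 'a', 'b' => some 'c' | 'b', 'a' => some 'c'
  | 'a', 'c' => some 'b' | 'c', 'a' => some 'b'
  | 'b', 'c' => some 'a' | 'c', 'b' => some 'a'
  | _, _ => none

-- the 'while stack and …' merge loop; stack top is the list head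
def pushMerge (stack : List Char) (c : Char) : List Char :=
  match stack with
  | t :: rest =>
      match thirdChar t c with
      | some d => pushMerge rest d
      | none => c :: t :: rest
  | [] => [c]

def StringReduction_alt (strParam : String) : Int :=
  ((strParam.toList.foldl pushMerge []).length : Int)

-- ===== PRECONDITION & SPEC =====
-- Pre_ excludes exactly the inputs on which A raises TypeError (get_replacement
-- returns None on a pair not drawn from the letters a, b, c): strings that contain
-- a character other than those letters together with at least two distinct characters.
def Pre_StringReduction (strParam : String) : Prop :=
  strParam.toList.all (fun c => c == 'a' || c == 'b' || c == 'c') = true ∨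
  strParam.toList.all (fun c => strParam.toList.all (fun d => c == d)) = true
instance (strParam : String) : Decidable (Pre_StringReduction strParam) := by
  unfold Pre_StringReduction; infer_instance
def pvWitness_StringReduction : String := "abcab"

def Spec_StringReduction (strParam : String) (out : Int) : Prop := out = StringReduction_alt strParam
instance (strParam : String) (out : Int) : Decidable (Spec_StringReduction strParam out) := by unfold Spec_StringReduction; infer_instance

-- ===== CLAIM (what is proved, stated in full; the proofs are below) =====
def Claim_equal_StringReduction : Prop := ∀ (strParam : String), Dom_StringReduction strParam → Pre_StringReduction strParam → Spec_StringReduction strParam (StringReduction strParam)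

-- ===== LEMMAS AND PROOFS =====

theorem thirdChar_self (a : Char) : thirdChar a a = none := by
  unfold thirdChar; split <;> simp_all

theorem pushMerge_rep (a : Char) (m : Nat) :
    pushMerge (List.replicate m a) a = List.replicate (m + 1) a := by
  cases m with
  | zero => rfl
  | succ n => simp [pushMerge, List.replicate_succ, thirdChar_self, List.replicate]

theorem foldl_rep (a : Char) : ∀ n m : Nat,
    List.foldl pushMerge (List.replicate m a) (List.replicate n a)
      = List.replicate (n + m) a := by
  intro n
  induction n with
  | zero => simp
  | succ k ih =>
    intro m
    rw [List.replicate_succ, List.foldl_cons, pushMerge_rep, ih]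
    congr 1; omega

theorem findPair_none_rep {s : List Char} (h : findPair s = none) :
    s = [] ∨ ∃ n a, s = List.replicate (n + 1) a := by
  induction s with
  | nil => left; rfl
  | cons x t ih =>
    match t with
    | [] => right; exact ⟨0, x, rfl⟩
    | y :: rest =>
      rw [findPair] at h
      by_cases hxy : x = y
      · simp [hxy] at h
        have h' : findPair (y :: rest) = none := by
          rcases h'' : findPair (y :: rest) with _ | ⟨p, a, b, suf⟩
          · rfl
          · rw [h''] at h; simp at h
        rcases ih h' with h0 | ⟨n, a, hrep⟩
        · simp at h0
        · right
          refine ⟨n + 1, a, ?_⟩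
          have hy : y = a := by
            have := congrArg (fun l => l.head?) hrep
            simp [List.replicate_succ] at this
            exact this
          rw [List.replicate_succ, ← hrep, hxy, hy]
      · simp [hxy] at h

theorem srList_of_findPair_none {s : List Char} (h : findPair s = none) :
    srList s = (s.length : Int) := by
  rw [srList]
  split
  · rfl
  · rw [h]

theorem getReplacement_mem {a b c : Char} (h : getReplacement a b = some c) :
    c = 'a' ∨ c = 'b' ∨ c = 'c' := by
  unfold getReplacement at h
  split_ifs at h <;>
    first | (injection h with h; subst h; decide) | simp at h

theorem repl_agree {a b : Char}
    (ha : a = 'a' ∨ a = 'b' ∨ a = 'c') (hb : b = 'a' ∨ b = 'b' ∨ b = 'c')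
    (hne : a ≠ b) :
    ∃ c, getReplacement a b = some c ∧ thirdChar a b = some c := by
  rcases ha with ha | ha | ha <;> rcases hb with hb | hb | hb <;> subst ha hb <;>
    first
      | exact absurd rfl hne
      | exact ⟨'a', by decide⟩
      | exact ⟨'b', by decide⟩
      | exact ⟨'c', by decide⟩

-- the stack pass gives the same result before and after A's single leftmost reduction
theorem cascade (a b c : Char) (k : Nat) (suf : List Char)
    (h : thirdChar a b = some c) :
    List.foldl pushMerge [] (List.replicate (k + 1) a ++ b :: suf)
      = List.foldl pushMerge [] (List.replicate k a ++ c :: suf) := by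
  rw [List.foldl_append, List.foldl_append]
  have h1 := foldl_rep a (k + 1) 0
  have h2 := foldl_rep a k 0
  simp only [List.replicate_zero, Nat.add_zero] at h1 h2
  rw [h1, h2, List.foldl_cons, List.foldl_cons]
  congr 1
  rw [List.replicate_succ, pushMerge, h]

theorem main_equiv : ∀ n (s : List Char), s.length = n →
    ((∀ c ∈ s, c = 'a' ∨ c = 'b' ∨ c = 'c') ∨ (∀ c ∈ s, ∀ d ∈ s, c = d)) →
    srList s = ((List.foldl pushMerge [] s).length : Int) := by
  intro n
  induction n using Nat.strong_induction_on with
  | _ n ih =>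
    intro s hlen hp
    rcases h : findPair s with _ | ⟨p, a, b, suf⟩
    · rw [srList_of_findPair_none h]
      rcases findPair_none_rep h with h0 | ⟨m, x, hrep⟩
      · subst h0; rfl
      · rw [hrep]
        have := foldl_rep x (m + 1) 0
        simp only [List.replicate_zero, Nat.add_zero] at this
        rw [this]
    · obtain ⟨hsh, hall, hne⟩ := findPair_shape h
      -- under Pre_, every char of s is in 'abc'
      have habc : ∀ c ∈ s, c = 'a' ∨ c = 'b' ∨ c = 'c' := by
        rcases hp with hp | hp
        · exact hp
        · exfalso
          apply hne
          exact hp a (by rw [hsh]; simp) b (by rw [hsh]; simp)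
      have ha := habc a (by rw [hsh]; simp)
      have hb := habc b (by rw [hsh]; simp)
      obtain ⟨c, hgr, htc⟩ := repl_agree ha hb hne
      have hpa : p = List.replicate p.length a :=
        List.eq_replicate_length.mpr hall
      have hslen : s.length = p.length + 2 + suf.length := by rw [hsh]; simp; omega
      -- A takes one step
      have hstep : srList s = srList (p ++ c :: suf) := by
        rw [srList]
        have hcond : ¬ (s.length = 1 ∨ (s.length = 2 ∧ s[0]? = s[1]?)) := by
          push_neg
          constructor
          · omega
          · intro h2
            have hp0 : p = [] := by
              have : p.length = 0 := by omega
              simpa [List.length_eq_zero_iff] using this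
            subst hp0
            simp at hsh
            rw [hsh]
            simp
            exact hne
        rw [if_neg hcond]
        split
        next p1 a1 b1 suf1 heq =>
          rw [h] at heq
          simp only [Option.some.injEq, Prod.mk.injEq] at heq
          obtain ⟨hp1, ha1, hb1, hs1⟩ := heq
          subst hp1; subst ha1; subst hb1; subst hs1
          rw [hgr]
        next heq => rw [h] at heq; exact absurd heq (by simp)
      rw [hstep]
      have hprelen : (p ++ c :: suf).length = p.length + 1 + suf.length := by simp; omega
      have hpre' : (∀ x ∈ p ++ c :: suf, x = 'a' ∨ x = 'b' ∨ x = 'c') ∨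
          (∀ x ∈ p ++ c :: suf, ∀ d ∈ p ++ c :: suf, x = d) := by
        left
        intro x hx
        rcases List.mem_append.mp hx with hx | hx
        · exact habc x (by rw [hsh]; exact List.mem_append.mpr (Or.inl hx))
        · rcases List.mem_cons.mp hx with hx | hx
          · subst hx; exact getReplacement_mem hgr
          · exact habc x (by rw [hsh]; simp [hx])
      rw [ih ((p ++ c :: suf).length) (by omega) _ rfl hpre']
      congr 2
      have hs' : s = List.replicate (p.length + 1) a ++ b :: suf := by
        rw [hsh]
        conv_lhs => rw [hpa]
        rw [List.replicate_succ']
        simp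
      rw [show (p : List Char) ++ c :: suf = List.replicate p.length a ++ c :: suf by
            rw [← hpa],
          hs', cascade a b c p.length suf htc]

theorem StringReduction_spec : Claim_equal_StringReduction := by
  intro s _ hpre
  unfold Spec_StringReduction StringReduction StringReduction_alt
  refine main_equiv s.toList.length s.toList rfl ?_
  unfold Pre_StringReduction at hpre
  rcases hpre with h | h
  · left
    intro c hc
    have := List.all_eq_true.mp h c hc
    simp at this
    tauto
  · right
    intro c hc d hd
    exact eq_of_beq (List.all_eq_true.mp (List.all_eq_true.mp h c hc) d hd)
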